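-- pv_equiv track=rewrite | github.com/ncsu-swat/incompleter | data/new_all/StackoverflowData-master/snippets/snippet-2423-ModuleNotFoundError.py | find_elevation_route_for_starting_row
-- ===== SOURCE A (Python) =====
-- def find_elevation_route_for_starting_row(grid, starting_row):
--
--     boolean_list = []
--     elevation_change = 0
--
--     for index_grid in range(len(grid)):
--         boolean_route = []
--         for index_grid_item in range(len(grid[index_grid])):
--             boolean_grid_item = False
--             if (index_grid == starting_row):
--                 boolean_grid_item = True
--                 if (index_grid_item + 1 < len(grid[index_grid])):
--                     absolute_value = abs(int(grid[index_grid][index_grid_item + 1]) - int(grid[index_grid][index_grid_item]))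
--                     elevation_change = elevation_change + absolute_value
--             boolean_route.append(boolean_grid_item)
--         boolean_list.append(boolean_route)
--
--     return (boolean_list, elevation_change)
-- ===== SOURCE B (Python) =====
-- def find_elevation_route_for_starting_row(grid, starting_row):
--     # Recursive back-to-front build: one structural recursion over the rows,
--     # with a separate recursive climb over the chosen row using max-min
--     # (max(a,b) - min(a,b) == abs(b - a)).
--     def climb(row):
--         if len(row) < 2:
--             return 0
--         a, b = int(row[0]), int(row[1])
--         return (max(a, b) - min(a, b)) + climb(row[1:])
--
--     def build(rows, i):
--         if not rows:
--             return ([], 0)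
--         tail, ec = build(rows[1:], i + 1)
--         if i == starting_row:
--             return ([[True] * len(rows[0])] + tail, ec + climb(rows[0]))
--         return ([[False] * len(rows[0])] + tail, ec)
--
--     return build(grid, 0)
-- ===== Notes on version B (the rewrite author's own statement) =====
-- stated objective: alternative
-- what changed: Replaces A's fused nested index loops threading one accumulator through every cell by a structural recursion that builds the result back-to-front: a recursive build over the row list plus a recursive climb over the selected row computed as max-min instead of abs.
import Mathlib
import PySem

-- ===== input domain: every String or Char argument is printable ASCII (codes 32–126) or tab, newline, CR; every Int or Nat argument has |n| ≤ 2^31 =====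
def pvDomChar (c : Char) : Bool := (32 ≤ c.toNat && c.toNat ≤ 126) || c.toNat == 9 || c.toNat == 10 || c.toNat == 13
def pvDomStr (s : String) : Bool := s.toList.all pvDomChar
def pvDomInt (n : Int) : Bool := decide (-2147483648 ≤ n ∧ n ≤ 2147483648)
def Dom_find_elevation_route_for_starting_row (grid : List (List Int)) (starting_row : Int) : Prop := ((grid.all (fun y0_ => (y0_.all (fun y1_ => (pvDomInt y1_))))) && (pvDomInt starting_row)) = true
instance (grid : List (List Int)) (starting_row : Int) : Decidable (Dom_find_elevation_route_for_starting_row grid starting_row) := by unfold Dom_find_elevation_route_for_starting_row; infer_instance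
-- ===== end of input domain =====

-- B replaces A's fused nested index loops by a structural recursion building the result
-- back-to-front (recursive build over the rows + recursive max-min climb over the chosen row);
-- objective: alternative decomposition, same cost.

-- ===== PORT A =====
-- literal transliteration of A's fused nested loop (range + indexing, accumulator threaded through)
def find_elevation_route_for_starting_row (grid : List (List Int)) (starting_row : Int) : List (List Bool) × Int :=
  (PySem.List.pyRange 0 (grid.length : Int) 1).foldl
    (fun (st : List (List Bool) × Int) index_grid =>
      let row := PySem.List.pyGetD grid index_grid []
      let inner :=
        (PySem.List.pyRange 0 (row.length : Int) 1).foldl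
          (fun (st2 : List Bool × Int) index_grid_item =>
            if index_grid = starting_row then
              if index_grid_item + 1 < (row.length : Int) then
                (st2.1 ++ [true],
                 st2.2 + |PySem.List.pyGetD row (index_grid_item + 1) 0 - PySem.List.pyGetD row index_grid_item 0|)
              else (st2.1 ++ [true], st2.2)
            else (st2.1 ++ [false], st2.2))
          (([] : List Bool), st.2)
      (st.1 ++ [inner.1], inner.2))
    (([] : List (List Bool)), 0)

-- ===== PORT B =====
-- Source B's climb: recursion over the row, max-min instead of abs
def pvClimb : List Int → Int
  | a :: b :: t => (max a b - min a b) + pvClimb (b :: t)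
  | _ => 0

-- Source B's build: structural recursion over the rows, consing the result back-to-front
def pvBuild (starting_row : Int) : List (List Int) → Int → List (List Bool) × Int
  | [], _ => ([], 0)
  | r :: t, i =>
    let rest := pvBuild starting_row t (i + 1)
    if i = starting_row then (List.replicate r.length true :: rest.1, rest.2 + pvClimb r)
    else (List.replicate r.length false :: rest.1, rest.2)

def find_elevation_route_for_starting_row_alt (grid : List (List Int)) (starting_row : Int) : List (List Bool) × Int :=
  pvBuild starting_row grid 0

-- ===== PRECONDITION & SPEC =====
def Spec_find_elevation_route_for_starting_row (grid : List (List Int)) (starting_row : Int) (out : List (List Bool) × Int) : Prop := out = find_elevation_route_for_starting_row_alt grid starting_row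
instance (grid : List (List Int)) (starting_row : Int) (out : List (List Bool) × Int) : Decidable (Spec_find_elevation_route_for_starting_row grid starting_row out) := by unfold Spec_find_elevation_route_for_starting_row; infer_instance

-- ===== CLAIM (what is proved, stated in full; the proofs are below) =====
def Claim_equal_find_elevation_route_for_starting_row : Prop := ∀ (grid : List (List Int)) (starting_row : Int), Dom_find_elevation_route_for_starting_row grid starting_row → Spec_find_elevation_route_for_starting_row grid starting_row (find_elevation_route_for_starting_row grid starting_row)

-- ===== LEMMAS AND PROOFS =====

-- a fold whose step appends one element to the first component and adds to the second splits
theorem pv_foldl_pair_split {α β : Type} (l : List α) (rb : α → β) (g : α → Int) :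
    ∀ (acc : List β) (ec : Int),
      l.foldl (fun st x => (st.1 ++ [rb x], st.2 + g x)) (acc, ec)
        = (acc ++ l.map rb, ec + (l.map g).sum) := by
  induction l with
  | nil => simp
  | cons a t ih =>
    intro acc ec
    simp [List.foldl_cons, ih, add_assoc]

-- the index-based adjacent-difference sum over List.range equals the zip sweep
theorem pv_range_sum_eq_zip (row : List Int) :
    ((List.range row.length).map
        (fun (j : Nat) => if (j : Int) + 1 < (row.length : Int)
                  then |row.getD (j+1) 0 - row.getD j 0| else 0)).sum
      = ((row.zip (row.drop 1)).map (fun q => |q.2 - q.1|)).sum := by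
  induction row with
  | nil => simp
  | cons x t ih =>
    rw [List.length_cons, List.range_succ_eq_map]
    simp only [List.map_cons, List.map_map, List.sum_cons]
    have h2 : ((List.range t.length).map
        ((fun (j : Nat) => if (j : Int) + 1 < ((t.length + 1 : Nat) : Int)
                  then |(x :: t).getD (j+1) 0 - (x :: t).getD j 0| else 0) ∘ Nat.succ)).sum
        = ((List.range t.length).map
        (fun (j : Nat) => if (j : Int) + 1 < (t.length : Int)
                  then |t.getD (j+1) 0 - t.getD j 0| else 0)).sum := by
      apply congrArg
      apply List.map_congr_left
      intro j _
      have hiff : ((j + 1 : Nat) : Int) + 1 < ((t.length + 1 : Nat) : Int) ↔ (j : Int) + 1 < (t.length : Int) := by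
        push_cast; omega
      simp only [Function.comp, Nat.succ_eq_add_one, List.getD_cons_succ]
      rw [if_congr hiff rfl rfl]
    rw [h2, ih]
    cases t with
    | nil => simp
    | cons y t' =>
      have hc : ((0 : Nat) : Int) + 1 < (((y :: t').length + 1 : Nat) : Int) := by
        push_cast [List.length_cons]; omega
      rw [if_pos hc]
      simp [List.zip_cons_cons]

-- the pyRange-indexed adjacent-difference sum equals the zip sweep
theorem pv_pyRange_sum_eq_zip (row : List Int) :
    ((PySem.List.pyRange 0 (row.length : Int) 1).map
        (fun j => if j + 1 < (row.length : Int)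
                  then |PySem.List.pyGetD row (j + 1) 0 - PySem.List.pyGetD row j 0| else 0)).sum
      = ((row.zip (row.drop 1)).map (fun q => |q.2 - q.1|)).sum := by
  rw [PySem.List.pyRange_zero_natCast, List.map_map]
  rw [← pv_range_sum_eq_zip]
  apply congrArg
  apply List.map_congr_left
  intro j _
  have hc : ((j : Int) + 1) = ((j + 1 : Nat) : Int) := by push_cast; ring
  simp only [Function.comp, hc, PySem.List.pyGetD_natCast]

-- B's recursive max-min climb computes the adjacent-pair zip sweep
theorem pv_climb_eq_zip (row : List Int) :
    pvClimb row = ((row.zip (row.drop 1)).map (fun q => |q.2 - q.1|)).sum := by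
  induction row with
  | nil => simp [pvClimb]
  | cons a t ih =>
    cases t with
    | nil => simp [pvClimb]
    | cons b t' =>
      simp only [pvClimb, ih, List.drop_succ_cons, List.drop_zero, List.zip_cons_cons,
        List.map_cons, List.sum_cons]
      rw [max_sub_min_eq_abs, abs_sub_comm]

-- A's inner loop over one row, for a fixed outer condition c, as (route, ec + added sum)
theorem pv_inner_loop (row : List Int) (c : Prop) [Decidable c] (ec : Int) :
    (PySem.List.pyRange 0 (row.length : Int) 1).foldl
        (fun (st2 : List Bool × Int) j =>
          if c then
            if j + 1 < (row.length : Int) then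
              (st2.1 ++ [true], st2.2 + |PySem.List.pyGetD row (j + 1) 0 - PySem.List.pyGetD row j 0|)
            else (st2.1 ++ [true], st2.2)
          else (st2.1 ++ [false], st2.2))
        (([] : List Bool), ec)
      = ((if c then List.replicate row.length true else List.replicate row.length false),
         ec + (if c then ((row.zip (row.drop 1)).map (fun q => |q.2 - q.1|)).sum else 0)) := by
  by_cases hc : c
  · rw [PySem.List.foldl_congr_mem _ _
        (fun (st2 : List Bool × Int) j =>
          (st2.1 ++ [(true : Bool)],
           st2.2 + (fun (j : Int) => if j + 1 < (row.length : Int)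
                      then |PySem.List.pyGetD row (j + 1) 0 - PySem.List.pyGetD row j 0| else 0) j)) _
        (by intro acc x _; by_cases hx : x + 1 < (row.length : Int) <;> simp [hc, hx])]
    rw [pv_foldl_pair_split]
    rw [pv_pyRange_sum_eq_zip]
    simp [hc, List.map_const', PySem.List.length_pyRange_one]
  · rw [PySem.List.foldl_congr_mem _ _
        (fun (st2 : List Bool × Int) j =>
          (st2.1 ++ [(false : Bool)], st2.2 + (fun (_ : Int) => (0 : Int)) j)) _
        (by intro acc x _; simp [hc])]
    rw [pv_foldl_pair_split]
    simp [hc, List.map_const', PySem.List.length_pyRange_one]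

-- B's recursion characterised over enumerate: marked rows + sum of per-row contributions
theorem pv_build_canon (sr : Int) (t : List (List Int)) :
    ∀ (i : Int),
      pvBuild sr t i
        = ((PySem.List.enumerate t i).map
             (fun p => if p.1 = sr then List.replicate p.2.length true
                       else List.replicate p.2.length false),
           ((PySem.List.enumerate t i).map
             (fun p => if p.1 = sr then pvClimb p.2 else 0)).sum) := by
  induction t with
  | nil => intro i; simp [pvBuild, PySem.List.enumerate_nil]
  | cons r tl ih =>
    intro i
    simp only [pvBuild, ih (i + 1), PySem.List.enumerate_cons, List.map_cons, List.sum_cons]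
    by_cases hi : i = sr
    · simp [hi, add_comm]
    · simp [hi]

-- ===== VERDICT (by name: the statement is the Claim_ definition above) =====
theorem find_elevation_route_for_starting_row_spec : Claim_equal_find_elevation_route_for_starting_row := by
  intro grid sr _
  show find_elevation_route_for_starting_row grid sr = find_elevation_route_for_starting_row_alt grid sr
  unfold find_elevation_route_for_starting_row find_elevation_route_for_starting_row_alt
  rw [PySem.List.foldl_congr_mem _ _
      (fun (st : List (List Bool) × Int) i =>
        (st.1 ++ [(fun (i : Int) => if i = sr
                    then List.replicate (PySem.List.pyGetD grid i []).length true
                    else List.replicate (PySem.List.pyGetD grid i []).length false) i],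
         st.2 + (fun (i : Int) => if i = sr
                    then (((PySem.List.pyGetD grid i []).zip ((PySem.List.pyGetD grid i []).drop 1)).map
                            (fun q => |q.2 - q.1|)).sum
                    else 0) i)) _
      (by
        intro acc i _
        simp only []
        rw [pv_inner_loop (PySem.List.pyGetD grid i []) (i = sr) acc.2])]
  rw [pv_foldl_pair_split]
  rw [pv_build_canon sr grid 0]
  simp only [PySem.List.enumerate_eq_map_pyRange grid ([] : List Int), List.map_map,
    PySem.List.len_eq, List.nil_append, zero_add]
  refine Prod.ext ?_ ?_
  · rfl
  · simp only []
    apply congrArg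
    apply List.map_congr_left
    intro j _
    by_cases hj : j = sr <;> simp [Function.comp, hj, pv_climb_eq_zip]
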